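-- pv_equiv track=rewrite | github.com/bradley499/python-terminal | core.py | parser_split
-- ===== SOURCE A (Python) =====
-- def parser_split(string,posix=True):
-- 	string = [char for char in string]
-- 	position_of_occurence = []
-- 	iteration_of_position = 0
-- 	within_posix = False
-- 	sibling_construct = None
-- 	for char in string:
-- 		if char in ["\"","\'"] and sibling_construct == None or char == sibling_construct:
-- 			occurence_restructured = []
-- 			completed_submask = False
-- 			for submask in position_of_occurence:
-- 				if len(submask) == 1:
-- 					submask.append(iteration_of_position)
-- 					completed_submask = True
-- 				occurence_restructured.append(submask)
-- 				if completed_submask: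
-- 					break
-- 			within_posix = False
-- 			sibling_construct = None
-- 			if not completed_submask:
-- 				within_posix = True
-- 				sibling_construct = char
-- 				occurence_restructured.append([iteration_of_position])
-- 			position_of_occurence = occurence_restructured
-- 		elif sibling_construct == None:
-- 			position_of_occurence.append((char,within_posix))
-- 		iteration_of_position += 1
-- 	join_by = []
-- 	temp_string = []
-- 	for encapsulated in position_of_occurence:
-- 		if len(encapsulated) == 1:
-- 			encapsulated.append(-1)
-- 		if encapsulated[1] == False:
-- 			temp_string.append(encapsulated[0].replace("="," "))
-- 		else:
-- 			join_by.extend("".join(temp_string).split())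
-- 			if encapsulated[1] < 0:
-- 				continue
-- 			temp_string = []
-- 			if posix:
-- 				encapsulated[0] += 1
-- 				encapsulated[1] -= 1
-- 			join_by.append("".join(string[encapsulated[0]:encapsulated[1] + 1]))
-- 	if len(temp_string) > 0:
-- 		join_by.extend("".join(temp_string).split())
-- 	return join_by
-- ===== SOURCE B (Python) =====
-- def parser_split(string, posix=True):
-- 	tokens = []
-- 	buf = []
-- 	quote = None
-- 	start = 0
-- 	for i, ch in enumerate(string):
-- 		if quote is None:
-- 			if ch == '"' or ch == "'":
-- 				tokens.extend(''.join(buf).split())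
-- 				buf = []
-- 				quote = ch
-- 				start = i
-- 			else:
-- 				buf.append(' ' if ch == '=' else ch)
-- 		elif ch == quote:
-- 			tokens.append(string[start + 1:i] if posix else string[start:i + 1])
-- 			quote = None
-- 	tokens.extend(''.join(buf).split())
-- 	return tokens
-- ===== Notes on version B (the rewrite author's own statement) =====
-- stated objective: faster
-- what changed: B tokenises in one forward pass that remembers the index of the currently open quote and emits each token immediately, replacing A's rescan of the whole accumulated occurrence list at every quote character plus a second reconstruction pass over that list.
-- intended difference: On strings with an unmatched opening quote preceded (since the last closed quote) by a token character, A flushes its pending token buffer twice and returns those trailing tokens duplicated (e.g. 'a "bc' -> ['a','a']); B returns them once (['a']), the intended tokenisation. — e.g. on parser_split("a \"bc", true): A returns ["a", "a"], B returns ["a"]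
import Mathlib
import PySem

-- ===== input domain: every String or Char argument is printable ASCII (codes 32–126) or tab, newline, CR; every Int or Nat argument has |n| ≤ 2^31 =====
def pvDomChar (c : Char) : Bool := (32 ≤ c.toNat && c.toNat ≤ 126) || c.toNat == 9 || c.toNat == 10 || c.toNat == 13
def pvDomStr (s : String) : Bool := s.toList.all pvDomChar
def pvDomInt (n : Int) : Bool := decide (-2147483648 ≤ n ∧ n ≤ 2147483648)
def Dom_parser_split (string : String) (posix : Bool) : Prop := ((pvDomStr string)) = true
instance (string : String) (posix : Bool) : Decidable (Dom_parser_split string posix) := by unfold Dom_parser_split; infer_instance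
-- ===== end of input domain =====

-- B is a single forward pass with an open-quote index (O(n)); A rescans its whole
-- accumulated occurrence list at every quote and then reconstructs in a second pass (O(n^2)).
-- On strings with an unmatched opening quote A duplicates the trailing tokens (D_ below); B emits them once.

-- ===== PORT A =====
-- "".join(parts).split() where parts are 1-char strings is transliterated on the char list
def splitJoin (cs : List Char) : List String := (PySem.Chars.split₀ cs).map String.ofList

-- an item of position_of_occurence: a 1- or 2-element index list, or a (char, bool) tuple
inductive PEntry where
  | mask (s : Int) (e : Option Int)
  | chr (c : Char) (b : Bool)
deriving DecidableEq, Repr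


-- the inner 'for submask in position_of_occurence: … if completed: break' loop
def restructure : List PEntry → Int → List PEntry × Bool
  | [], _ => ([], false)
  | .mask s none :: _rest, it => ([PEntry.mask s (some it)], true)
  | e :: rest, it => let r := restructure rest it; (e :: r.1, r.2)

-- the first 'for char in string' loop; state: position_of_occurence, iteration, within_posix, sibling_construct
def phase1 : List Char → List PEntry → Int → Bool → Option Char → List PEntry
  | [], poo, _, _, _ => poo
  | c :: rest, poo, it, _wp, sib =>
    if ((c = '"' ∨ c = '\'') ∧ sib = none) ∨ sib = some c then
      let r := restructure poo it
      if r.2 then phase1 rest r.1 (it + 1) false none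
      else phase1 rest (r.1 ++ [PEntry.mask it none]) (it + 1) true (some c)
    else if sib = none then
      phase1 rest (poo ++ [PEntry.chr c _wp]) (it + 1) _wp sib
    else phase1 rest poo (it + 1) _wp sib

-- the second 'for encapsulated in position_of_occurence' loop; state: join_by, temp_string
def phase2 (chars : List Char) (posix : Bool) : List PEntry → List String → List Char → List String × List Char
  | [], jb, temp => (jb, temp)
  | PEntry.chr c b :: rest, jb, temp =>
    if b = false then
      -- encapsulated[0].replace("="," ") on a 1-char string
      phase2 chars posix rest jb (temp ++ [if c = '=' then ' ' else c])
    else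
      -- unreachable for every input (phase1 only ever appends (char, False)); Python raises below this point
      phase2 chars posix rest (jb ++ splitJoin temp) []
  | PEntry.mask s e? :: rest, jb, temp =>
    let e := e?.getD (-1)          -- 'if len(encapsulated) == 1: encapsulated.append(-1)'
    if e = 0 then phase2 chars posix rest jb temp  -- 'encapsulated[1] == False' with int 0: unreachable for every input (Python raises AttributeError there)
    else
      let jb' := jb ++ splitJoin temp
      if e < 0 then phase2 chars posix rest jb' temp
      else
        let s' := if posix then s + 1 else s
        let e' := if posix then e - 1 else e
        phase2 chars posix rest (jb' ++ [String.ofList (PySem.List.slice chars (some s') (some (e' + 1)))]) []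

-- 'if len(temp_string) > 0: join_by.extend(...)'
def finalize (r : List String × List Char) : List String :=
  if r.2.length > 0 then r.1 ++ splitJoin r.2 else r.1

def parser_split (string : String) (posix : Bool) : List String :=
  let chars := string.toList
  finalize (phase2 chars posix (phase1 chars [] 0 false none) [] [])

-- ===== PORT B =====
-- single pass; state: tokens, buf (current unquoted chars, '=' already replaced), quote, start index
def altGo (chars : List Char) (posix : Bool) : List Char → Int → List String → List Char → Option Char → Int → List String
  | [], _, toks, buf, _, _ => toks ++ splitJoin buf
  | c :: rest, i, toks, buf, none, st =>
    if c = '"' ∨ c = '\'' then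
      altGo chars posix rest (i + 1) (toks ++ splitJoin buf) [] (some c) i
    else
      altGo chars posix rest (i + 1) toks (buf ++ [if c = '=' then ' ' else c]) none st
  | c :: rest, i, toks, buf, some q, st =>
    if c = q then
      altGo chars posix rest (i + 1)
        (toks ++ [String.ofList (if posix then PySem.List.slice chars (some (st + 1)) (some i)
                             else PySem.List.slice chars (some st) (some (i + 1)))])
        [] none st
    else altGo chars posix rest (i + 1) toks buf (some q) st

def parser_split_alt (string : String) (posix : Bool) : List String :=
  altGo string.toList posix string.toList 0 [] [] none 0

-- ===== PRECONDITION & SPEC =====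
-- On strings ending inside an unmatched quote that is preceded (since the last closed quote)
-- by a token character, A flushes its pending token buffer twice and so returns those trailing
-- tokens duplicated; B returns them once, which is the intended tokenisation.
def dstrand : List Char → Option Char → Bool → Bool
  | [], q, f => q.isSome && f
  | c :: rest, none, f =>
    if c = '"' ∨ c = '\'' then dstrand rest (some c) f
    else dstrand rest none (f || !(c == ' ' || c == '\t' || c == '\n' || c == '\r' || c == '='))
  | c :: rest, some q, f =>
    if c = q then dstrand rest none false else dstrand rest (some q) f

def D_parser_split (string : String) (posix : Bool) : Prop :=
  dstrand string.toList none false = true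
instance (string : String) (posix : Bool) : Decidable (D_parser_split string posix) := by
  unfold D_parser_split; infer_instance

def Spec_parser_split (string : String) (posix : Bool) (out : List String) : Prop :=
  ¬ D_parser_split string posix → out = parser_split_alt string posix
instance (string : String) (posix : Bool) (out : List String) : Decidable (Spec_parser_split string posix out) := by
  unfold Spec_parser_split; infer_instance

def pvDiffWitness_parser_split : String × Bool := ("a \"bc", true)
def pvDiffWitnessOut_parser_split : (List String) × (List String) := (["a", "a"], ["a"])

-- ===== CLAIM (what is proved, stated in full; the proofs are below) =====
def Claim_unchanged_parser_split : Prop := ∀ (string : String) (posix : Bool), Dom_parser_split string posix → Spec_parser_split string posix (parser_split string posix)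
def Claim_changed_parser_split : Prop := Dom_parser_split (pvDiffWitness_parser_split.1) (pvDiffWitness_parser_split.2) ∧ D_parser_split (pvDiffWitness_parser_split.1) (pvDiffWitness_parser_split.2) ∧ parser_split (pvDiffWitness_parser_split.1) (pvDiffWitness_parser_split.2) = pvDiffWitnessOut_parser_split.1 ∧ parser_split_alt (pvDiffWitness_parser_split.1) (pvDiffWitness_parser_split.2) = pvDiffWitnessOut_parser_split.2 ∧ pvDiffWitnessOut_parser_split.1 ≠ pvDiffWitnessOut_parser_split.2
def Claim_exact_parser_split : Prop := ∀ (string : String) (posix : Bool), Dom_parser_split string posix → D_parser_split string posix → parser_split string posix ≠ parser_split_alt string posix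

-- ===== LEMMAS AND PROOFS =====

-- proof-only helpers: the quote/stranded-token scan with its full state, and its agreement with dstrand
def dscan : List Char → Option Char → Bool → Option Char × Bool
  | [], q, f => (q, f)
  | c :: rest, none, f =>
    if c = '"' ∨ c = '\'' then dscan rest (some c) f
    else dscan rest none (f || !(c == ' ' || c == '\t' || c == '\n' || c == '\r' || c == '='))
  | c :: rest, some q, f =>
    if c = q then dscan rest none false else dscan rest (some q) f

lemma dstrand_eq_dscan : ∀ (l : List Char) (q : Option Char) (f : Bool),
    dstrand l q f = ((dscan l q f).1.isSome && (dscan l q f).2) := by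
  intro l
  induction l with
  | nil => intro q f; cases q <;> rfl
  | cons c rest ih =>
    intro q f
    match q with
    | none =>
      by_cases hq : c = '"' ∨ c = '\'' <;> simp [dstrand, dscan, hq, ih]
    | some qc =>
      by_cases hc : c = qc <;> simp [dstrand, dscan, hc, ih]

-- proof-only helper: an entry of position_of_occurence that is not a pending 1-element index list
def entryClosed : PEntry → Bool
  | .mask _ none => false
  | _ => true

lemma split0_go_nil_iff : ∀ (cs cur : List Char) (acc : List (List Char)),
    (PySem.Chars.split₀.go cs cur acc = []) ↔ (acc = [] ∧ cur = [] ∧ cs.all PySem.Chars.isspace = true) := by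
  intro cs
  induction cs with
  | nil =>
    intro cur acc
    simp only [PySem.Chars.split₀.go]
    by_cases h : cur = [] <;> simp [h, List.isEmpty_iff]
  | cons c rest ih =>
    intro cur acc
    simp only [PySem.Chars.split₀.go]
    by_cases hws : PySem.Chars.isspace c
    · by_cases hcur : cur = [] <;> simp [hws, hcur, List.isEmpty_iff, ih]
    · simp [hws, ih]

lemma splitJoin_nil_iff (cs : List Char) :
    splitJoin cs = [] ↔ cs.all PySem.Chars.isspace = true := by
  rw [splitJoin, List.map_eq_nil_iff, PySem.Chars.split₀, split0_go_nil_iff]; simp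

lemma splitJoin_nil : splitJoin [] = [] := by
  rw [splitJoin_nil_iff]; simp

lemma char_eq_iff_toNat (c d : Char) : (c = d) ↔ c.toNat = d.toNat := by
  constructor
  · intro h; rw [h]
  · intro h; exact Char.ext (UInt32.toNat_inj.mp h)

lemma ws_eq (c : Char) (h : pvDomChar c = true) :
    PySem.Chars.isspace (if c = '=' then ' ' else c)
      = (c == ' ' || c == '\t' || c == '\n' || c == '\r' || c == '=') := by
  by_cases hc : c = '='
  · simp [hc]; decide
  · rw [if_neg hc]
    rw [Bool.eq_iff_iff]
    rw [char_eq_iff_toNat] at hc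
    simp only [pvDomChar, Bool.or_eq_true, Bool.and_eq_true, decide_eq_true_eq, beq_iff_eq] at h
    simp only [PySem.Chars.isspace, Bool.or_eq_true, Bool.and_eq_true, decide_eq_true_eq,
      beq_iff_eq, char_eq_iff_toNat]
    simp only [show (' ').toNat = 32 from rfl, show ('\t').toNat = 9 from rfl,
      show ('\n').toNat = 10 from rfl, show ('\r').toNat = 13 from rfl,
      show ('=').toNat = 61 from rfl] at *
    omega

lemma restructure_closed (l : List PEntry) (it : Int)
    (h : ∀ e ∈ l, entryClosed e = true) : restructure l it = (l, false) := by
  induction l with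
  | nil => rfl
  | cons e rest ih =>
    have he := h e (by simp)
    have hrest := fun x hx => h x (List.mem_cons_of_mem _ hx)
    match e with
    | .mask s none => simp [entryClosed] at he
    | .mask s (some t) => simp [restructure, ih hrest]
    | .chr c b => simp [restructure, ih hrest]

lemma restructure_open (l : List PEntry) (s it : Int)
    (h : ∀ e ∈ l, entryClosed e = true) :
    restructure (l ++ [PEntry.mask s none]) it = (l ++ [PEntry.mask s (some it)], true) := by
  induction l with
  | nil => rfl
  | cons e rest ih =>
    have he := h e (by simp)
    have hrest := fun x hx => h x (List.mem_cons_of_mem _ hx)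
    match e with
    | .mask a none => simp [entryClosed] at he
    | .mask a (some t) => simp [restructure, ih hrest]
    | .chr c b => simp [restructure, ih hrest]

lemma phase2_append (chars : List Char) (posix : Bool) :
    ∀ (xs ys : List PEntry) (jb : List String) (temp : List Char),
    phase2 chars posix (xs ++ ys) jb temp
      = phase2 chars posix ys (phase2 chars posix xs jb temp).1 (phase2 chars posix xs jb temp).2 := by
  intro xs
  induction xs with
  | nil => intro ys jb temp; rfl
  | cons e rest ih =>
    intro ys jb temp
    match e with
    | .chr c b =>
      by_cases hb : b = false <;> simp [phase2, hb, ih]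
    | .mask s e? =>
      simp only [List.cons_append, phase2]
      by_cases h0 : e?.getD (-1) = 0
      · simp only [h0]
        exact ih ys jb temp
      · by_cases hneg : e?.getD (-1) < 0 <;> simp [h0, hneg, ih]


lemma main_induction (chars : List Char) (posix : Bool) :
    ∀ rest : List Char, (∀ c ∈ rest, pvDomChar c = true) →
    ( (∀ (n : Int) (poo : List PEntry) (toks : List String) (buf : List Char) (st : Int),
        0 ≤ n →
        (∀ e ∈ poo, entryClosed e = true) →
        phase2 chars posix poo [] [] = (toks, buf) →
        ∃ extra,
          finalize (phase2 chars posix (phase1 rest poo n false none) [] [])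
            = altGo chars posix rest n toks buf none st ++ extra
          ∧ (extra = [] ↔
              ¬((dscan rest none (!(buf.all PySem.Chars.isspace))).1.isSome = true
                 ∧ (dscan rest none (!(buf.all PySem.Chars.isspace))).2 = true)))
    ∧ (∀ (n st : Int) (q : Char) (poo₀ : List PEntry) (toks₀ : List String) (temp₀ : List Char),
        0 ≤ st → st < n →
        (∀ e ∈ poo₀, entryClosed e = true) →
        phase2 chars posix poo₀ [] [] = (toks₀, temp₀) →
        ∃ extra,
          finalize (phase2 chars posix
              (phase1 rest (poo₀ ++ [PEntry.mask st none]) n true (some q)) [] [])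
            = altGo chars posix rest n (toks₀ ++ splitJoin temp₀) [] (some q) st ++ extra
          ∧ (extra = [] ↔
              ¬((dscan rest (some q) (!(temp₀.all PySem.Chars.isspace))).1.isSome = true
                 ∧ (dscan rest (some q) (!(temp₀.all PySem.Chars.isspace))).2 = true))) ) := by
  intro rest
  induction rest with
  | nil =>
    intro _
    constructor
    · intro n poo toks buf st hn hGood hp2
      refine ⟨[], ?_, by simp [dscan]⟩
      simp only [phase1, altGo, hp2, finalize, List.append_nil]
      by_cases hbuf : buf = []
      · simp [hbuf, splitJoin_nil]
      · rw [if_pos (by simpa [List.length_pos_iff] using hbuf)]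
    · intro n st q poo₀ toks₀ temp₀ hst hstn hGood hp2
      refine ⟨splitJoin temp₀, ?_, ?_⟩
      · simp only [phase1, altGo, phase2_append, hp2]
        simp only [phase2, Option.getD_none]
        norm_num
        simp only [finalize, splitJoin_nil]
        by_cases htemp : temp₀ = []
        · simp [htemp, splitJoin_nil]
        · rw [if_pos (by simpa [List.length_pos_iff] using htemp)]
          simp
      · simp [dscan, splitJoin_nil_iff]
  | cons c rest ih =>
    intro hdom
    have hdomc : pvDomChar c = true := hdom c (by simp)
    have hdomrest : ∀ x ∈ rest, pvDomChar x = true := fun x hx => hdom x (by simp [hx])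
    have ihn := (ih hdomrest).1
    have ihs := (ih hdomrest).2
    constructor
    · -- none state
      intro n poo toks buf st hn hGood hp2
      by_cases hq : c = '"' ∨ c = '\''
      · -- opening quote
        have hstep : phase1 (c :: rest) poo n false none
            = phase1 rest (poo ++ [PEntry.mask n none]) (n + 1) true (some c) := by
          simp [phase1, restructure_closed poo n hGood, hq]
        have haltstep : altGo chars posix (c :: rest) n toks buf none st
            = altGo chars posix rest (n + 1) (toks ++ splitJoin buf) [] (some c) n := by
          simp [altGo, hq]
        rw [hstep, haltstep]
        obtain ⟨extra, heq, hiff⟩ := ihs (n+1) n c poo toks buf hn (by omega) hGood hp2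
        refine ⟨extra, heq, ?_⟩
        rw [hiff]
        simp [dscan, hq]
      · -- ordinary character
        have hstep : phase1 (c :: rest) poo n false none
            = phase1 rest (poo ++ [PEntry.chr c false]) (n + 1) false none := by
          simp [phase1, hq]
        have haltstep : altGo chars posix (c :: rest) n toks buf none st
            = altGo chars posix rest (n + 1) toks (buf ++ [if c = '=' then ' ' else c]) none st := by
          simp [altGo, hq]
        rw [hstep, haltstep]
        have hp2' : phase2 chars posix (poo ++ [PEntry.chr c false]) [] []
            = (toks, buf ++ [if c = '=' then ' ' else c]) := by
          rw [phase2_append, hp2]; simp [phase2]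
        have hGood' : ∀ e ∈ poo ++ [PEntry.chr c false], entryClosed e = true := by
          intro e he
          rcases List.mem_append.mp he with h | h
          · exact hGood e h
          · simp at h; subst h; rfl
        obtain ⟨extra, heq, hiff⟩ := ihn (n+1) (poo ++ [PEntry.chr c false]) toks
          (buf ++ [if c = '=' then ' ' else c]) st (by omega) hGood' hp2'
        refine ⟨extra, heq, ?_⟩
        rw [hiff]
        have hfl : (!((buf ++ [if c = '=' then ' ' else c]).all PySem.Chars.isspace))
            = ((!(buf.all PySem.Chars.isspace))
               || !(c == ' ' || c == '\t' || c == '\n' || c == '\r' || c == '=')) := by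
          rw [List.all_append]
          simp [ws_eq c hdomc]
        rw [hfl]
        simp [dscan, hq]
    · -- some-q state
      intro n st q poo₀ toks₀ temp₀ hst hstn hGood hp2
      by_cases hc : c = q
      · -- closing quote
        subst hc
        have hstep : phase1 (c :: rest) (poo₀ ++ [PEntry.mask st none]) n true (some c)
            = phase1 rest (poo₀ ++ [PEntry.mask st (some n)]) (n + 1) false none := by
          simp [phase1, restructure_open poo₀ st n hGood]
        have haltstep : altGo chars posix (c :: rest) n (toks₀ ++ splitJoin temp₀) [] (some c) st
            = altGo chars posix rest (n + 1)
                ((toks₀ ++ splitJoin temp₀)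
                  ++ [String.ofList (if posix then PySem.List.slice chars (some (st + 1)) (some n)
                                     else PySem.List.slice chars (some st) (some (n + 1)))]) [] none st := by
          simp [altGo]
        rw [hstep, haltstep]
        have hp2' : phase2 chars posix (poo₀ ++ [PEntry.mask st (some n)]) [] []
            = ((toks₀ ++ splitJoin temp₀)
               ++ [String.ofList (if posix then PySem.List.slice chars (some (st + 1)) (some n)
                                  else PySem.List.slice chars (some st) (some (n + 1)))], []) := by
          rw [phase2_append, hp2]
          simp only [phase2, Option.getD_some]
          rw [if_neg (show ¬(n : Int) = 0 by omega), if_neg (show ¬(n : Int) < 0 by omega)]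
          by_cases hp : posix
          · simp only [hp, if_true]
            rw [show n - 1 + 1 = n by ring]
          · simp [hp]
        have hGood' : ∀ e ∈ poo₀ ++ [PEntry.mask st (some n)], entryClosed e = true := by
          intro e he
          rcases List.mem_append.mp he with h | h
          · exact hGood e h
          · simp at h; subst h; rfl
        obtain ⟨extra, heq, hiff⟩ := ihn (n+1) (poo₀ ++ [PEntry.mask st (some n)])
          ((toks₀ ++ splitJoin temp₀)
            ++ [String.ofList (if posix then PySem.List.slice chars (some (st + 1)) (some n)
                               else PySem.List.slice chars (some st) (some (n + 1)))])
          [] st (by omega) hGood' hp2'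
        refine ⟨extra, ?_, ?_⟩
        · rw [heq]
        · rw [hiff]
          simp [dscan]
      · -- character inside quotes
        have hstep : phase1 (c :: rest) (poo₀ ++ [PEntry.mask st none]) n true (some q)
            = phase1 rest (poo₀ ++ [PEntry.mask st none]) (n + 1) true (some q) := by
          have hqc : ¬ q = c := fun h => hc h.symm
          simp [phase1, hqc]
        have haltstep : altGo chars posix (c :: rest) n (toks₀ ++ splitJoin temp₀) [] (some q) st
            = altGo chars posix rest (n + 1) (toks₀ ++ splitJoin temp₀) [] (some q) st := by
          simp [altGo, hc]
        rw [hstep, haltstep]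
        obtain ⟨extra, heq, hiff⟩ := ihs (n+1) st q poo₀ toks₀ temp₀ hst (by omega) hGood hp2
        refine ⟨extra, heq, ?_⟩
        rw [hiff]
        simp [dscan, hc]

lemma parser_split_decomp (string : String) (posix : Bool)
    (hdom : Dom_parser_split string posix) :
    ∃ extra : List String,
      parser_split string posix = parser_split_alt string posix ++ extra ∧
      (extra = [] ↔ ¬ D_parser_split string posix) := by
  have hdom' : ∀ c ∈ string.toList, pvDomChar c = true := by
    simpa [Dom_parser_split, pvDomStr, List.all_eq_true] using hdom
  obtain ⟨extra, heq, hiff⟩ := (main_induction string.toList posix string.toList hdom').1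
    0 [] [] [] 0 le_rfl (by simp) rfl
  refine ⟨extra, ?_, ?_⟩
  · simpa [parser_split, parser_split_alt] using heq
  · rw [hiff, D_parser_split, dstrand_eq_dscan]
    simp

-- ===== VERDICT (by name: the statement is the Claim_ definition above) =====
theorem parser_split_spec : Claim_unchanged_parser_split := by
  intro s p hdom hnd
  obtain ⟨extra, heq, hiff⟩ := parser_split_decomp s p hdom
  rw [heq, hiff.2 hnd, List.append_nil]

theorem parser_split_changed : Claim_changed_parser_split := by
  unfold Claim_changed_parser_split; decide

theorem parser_split_tight : Claim_exact_parser_split := by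
  intro s p hdom hd
  obtain ⟨extra, heq, hiff⟩ := parser_split_decomp s p hdom
  intro hcontra
  have hex : extra = [] := by
    have := congrArg List.length heq
    rw [hcontra, List.length_append] at this
    simpa using (List.length_eq_zero_iff).mp (by omega)
  exact (hiff.1 hex) hd
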